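-- pv_equiv track=rewrite | github.com/asmoyou/LinX | backend/agent_framework/base_agent.py | _extract_balanced_json_objects
-- ===== SOURCE A (Python) =====
-- from typing import Any, Callable, Dict, List, Optional, Set, Tuple
--
-- def _extract_balanced_json_objects(text: str) -> List[Tuple[str, int, int]]:
--     """Extract balanced JSON object substrings with spans from arbitrary text.
--
--     This scanner is quote-aware, so braces inside JSON strings do not break extraction.
--     """
--     objects: List[Tuple[str, int, int]] = []
--     if not text:
--         return objects
--
--     depth = 0
--     start_idx: Optional[int] = None
--     in_string = False
--     escape_next = False
--
--     for idx, char in enumerate(text):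
--         if escape_next:
--             escape_next = False
--             continue
--
--         if in_string:
--             if char == "\\":
--                 escape_next = True
--             elif char == '"':
--                 in_string = False
--             continue
--
--         if char == '"':
--             in_string = True
--             continue
--
--         if char == "{":
--             if depth == 0:
--                 start_idx = idx
--             depth += 1
--             continue
--
--         if char == "}" and depth > 0:
--             depth -= 1
--             if depth == 0 and start_idx is not None:
--                 objects.append((text[start_idx : idx + 1], start_idx, idx + 1))
--                 start_idx = None
--
--     return objects
-- ===== SOURCE B (Python) =====
-- from typing import List, Tuple
--
-- def _extract_balanced_json_objects(text: str) -> List[Tuple[str, int, int]]: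
--     """Two-pass variant: first collect the structural braces (those outside
--     JSON strings, honouring backslash escapes), then match them with a
--     plain depth counter."""
--     # Pass 1: indices of braces that are not inside a string literal.
--     braces: List[Tuple[int, str]] = []
--     in_string = False
--     escape_next = False
--     for idx, char in enumerate(text):
--         if escape_next:
--             escape_next = False
--         elif in_string:
--             if char == "\\":
--                 escape_next = True
--             elif char == '"':
--                 in_string = False
--         elif char == '"':
--             in_string = True
--         elif char in "{}":
--             braces.append((idx, char))
--
--     # Pass 2: depth matching over structural braces only.
--     objects: List[Tuple[str, int, int]] = []
--     depth = 0
--     start = 0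
--     for idx, char in braces:
--         if char == "{":
--             if depth == 0:
--                 start = idx
--             depth += 1
--         elif depth > 0:
--             depth -= 1
--             if depth == 0:
--                 objects.append((text[start : idx + 1], start, idx + 1))
--     return objects
-- ===== Notes on version B (the rewrite author's own statement) =====
-- stated objective: alternative
-- what changed: B splits A's single five-variable state machine into two passes: a first scan that extracts only the structural braces (quote/escape handling), then a plain depth-counter match over that brace list; both are O(n), no speed claim.
import Mathlib
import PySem

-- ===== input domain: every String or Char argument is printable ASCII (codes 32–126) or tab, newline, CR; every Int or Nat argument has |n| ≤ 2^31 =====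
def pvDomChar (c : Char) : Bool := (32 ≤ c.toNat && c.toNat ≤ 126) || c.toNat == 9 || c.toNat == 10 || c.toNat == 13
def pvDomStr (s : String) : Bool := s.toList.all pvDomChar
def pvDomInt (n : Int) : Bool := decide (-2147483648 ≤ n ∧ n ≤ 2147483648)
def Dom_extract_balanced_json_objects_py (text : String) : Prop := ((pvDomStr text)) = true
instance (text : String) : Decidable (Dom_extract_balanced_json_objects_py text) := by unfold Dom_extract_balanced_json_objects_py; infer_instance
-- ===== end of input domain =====

-- B re-decomposes A: pass 1 extracts the structural braces, pass 2 matches them by depth.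
-- A mutates nothing; equivalence is about the return value.
-- loop of A: state = (objects, depth, start_idx, in_string, escape_next), one step per enumerated char
def pvLoopA (text : String) : List (Int × Char) → List (String × Int × Int) × Int × Option Int × Bool × Bool → List (String × Int × Int) × Int × Option Int × Bool × Bool
  | [], st => st
  | (idx, c) :: rest, (objs, depth, start, instr, esc) =>
    if esc then pvLoopA text rest (objs, depth, start, instr, false)
    else if instr then
      if c = '\\' then pvLoopA text rest (objs, depth, start, instr, true)
      else if c = '"' then pvLoopA text rest (objs, depth, start, false, esc)
      else pvLoopA text rest (objs, depth, start, instr, esc)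
    else if c = '"' then pvLoopA text rest (objs, depth, start, true, esc)
    else if c = '{' then
      pvLoopA text rest (objs, depth + 1, (if depth = 0 then some idx else start), instr, esc)
    else if c = '}' ∧ 0 < depth then
      if depth - 1 = 0 then
        match start with
        | some s =>
            pvLoopA text rest (objs ++ [(PySem.Str.slice text (some s) (some (idx + 1)), s, idx + 1)], depth - 1, none, instr, esc)
        | none => pvLoopA text rest (objs, depth - 1, start, instr, esc)
      else pvLoopA text rest (objs, depth - 1, start, instr, esc)
    else pvLoopA text rest (objs, depth, start, instr, esc)

def extract_balanced_json_objects_py (text : String) : List (String × Int × Int) :=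
  if text = "" then []
  else (pvLoopA text (PySem.List.enumerate text.toList 0) ([], 0, none, false, false)).1

-- ===== PORT B =====
-- pass 1 of B: structural braces (outside string literals, honouring escapes)
def pvPass1 : List (Int × Char) → Bool → Bool → List (Int × Char)
  | [], _, _ => []
  | (idx, c) :: rest, instr, esc =>
    if esc then pvPass1 rest instr false
    else if instr then
      if c = '\\' then pvPass1 rest instr true
      else if c = '"' then pvPass1 rest false esc
      else pvPass1 rest instr esc
    else if c = '"' then pvPass1 rest true esc
    else if c = '{' ∨ c = '}' then (idx, c) :: pvPass1 rest instr esc   -- char in "{}"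
    else pvPass1 rest instr esc

-- pass 2 of B: depth matching over the brace list
def pvPass2 (text : String) : List (Int × Char) → List (String × Int × Int) × Int × Int → List (String × Int × Int) × Int × Int
  | [], st => st
  | (idx, c) :: rest, (objs, depth, start) =>
    if c = '{' then pvPass2 text rest (objs, depth + 1, if depth = 0 then idx else start)
    else if 0 < depth then
      if depth - 1 = 0 then
        pvPass2 text rest (objs ++ [(PySem.Str.slice text (some start) (some (idx + 1)), start, idx + 1)], depth - 1, start)
      else pvPass2 text rest (objs, depth - 1, start)
    else pvPass2 text rest (objs, depth, start)

def extract_balanced_json_objects_py_alt (text : String) : List (String × Int × Int) :=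
  (pvPass2 text (pvPass1 (PySem.List.enumerate text.toList 0) false false) ([], 0, 0)).1

-- ===== PRECONDITION & SPEC =====
def Spec_extract_balanced_json_objects_py (text : String) (out : List (String × Int × Int)) : Prop := out = extract_balanced_json_objects_py_alt text
instance (text : String) (out : List (String × Int × Int)) : Decidable (Spec_extract_balanced_json_objects_py text out) := by unfold Spec_extract_balanced_json_objects_py; infer_instance

-- ===== CLAIM (what is proved, stated in full; the proofs are below) =====
def Claim_equal_extract_balanced_json_objects_py : Prop := ∀ (text : String), Dom_extract_balanced_json_objects_py text → Spec_extract_balanced_json_objects_py text (extract_balanced_json_objects_py text)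

-- ===== LEMMAS AND PROOFS =====

-- ===== VERDICT (by name: the statement is the Claim_ definition above) =====
lemma pvKey (text : String) : ∀ (l : List (Int × Char)) (objs : List (String × Int × Int)) (depth : Int) (startA : Option Int) (startB : Int) (instr esc : Bool), (0 < depth → startA = some startB) → (pvLoopA text l (objs, depth, startA, instr, esc)).1 = (pvPass2 text (pvPass1 l instr esc) (objs, depth, startB)).1 := by
  intro l
  induction l with
  | nil => intro objs depth startA startB instr esc h; simp [pvLoopA, pvPass1, pvPass2]
  | cons p rest ih =>
    obtain ⟨idx, c⟩ := p
    intro objs depth startA startB instr esc h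
    cases esc with
    | true => simpa [pvLoopA, pvPass1] using ih objs depth startA startB instr false h
    | false =>
      cases instr with
      | true =>
        by_cases hb : c = '\\'
        · simpa [pvLoopA, pvPass1, hb] using ih objs depth startA startB true true h
        · by_cases hq : c = '"'
          · simpa [pvLoopA, pvPass1, hb, hq] using ih objs depth startA startB false false h
          · simpa [pvLoopA, pvPass1, hb, hq] using ih objs depth startA startB true false h
      | false =>
        by_cases hq : c = '"'
        · simpa [pvLoopA, pvPass1, hq] using ih objs depth startA startB true false h
        · by_cases ho : c = '{'
          · have h' : 0 < depth + 1 → (if depth = 0 then some idx else startA) = some (if depth = 0 then idx else startB) := by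
              intro hp
              by_cases hd : depth = 0
              · simp [hd]
              · simp only [hd]; exact h (by omega)
            simpa [pvLoopA, pvPass1, pvPass2, hq, ho] using ih objs (depth + 1) _ _ false false h'
          · by_cases hc : c = '}'
            · by_cases hd : 0 < depth
              · have hs := h hd
                by_cases h1 : depth - 1 = 0
                · simp only [pvLoopA, pvPass1, hc, hd, h1, hs, if_pos, and_self]
                  simpa [pvLoopA, pvPass1, pvPass2, hq, ho, hc, hd, h1, hs] using
                    ih (objs ++ [(PySem.Str.slice text (some startB) (some (idx + 1)), startB, idx + 1)])
                      (depth - 1) none startB false false (fun hx => absurd hx (by omega))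
                · simpa [pvLoopA, pvPass1, pvPass2, hq, ho, hc, hd, h1, hs] using
                    ih objs (depth - 1) startA startB false false (fun _ => hs)
              · simpa [pvLoopA, pvPass1, pvPass2, hq, ho, hc, hd] using ih objs depth startA startB false false h
            · simpa [pvLoopA, pvPass1, hq, ho, hc] using ih objs depth startA startB false false h

theorem extract_balanced_json_objects_py_spec : Claim_equal_extract_balanced_json_objects_py := by
  intro text _
  unfold Spec_extract_balanced_json_objects_py extract_balanced_json_objects_py extract_balanced_json_objects_py_alt
  split
  · rename_i h; subst h; rfl
  · exact pvKey text _ [] 0 none 0 false false (by omega)
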